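-- pv_equiv track=rewrite | github.com/hongyi-h/Holter | scripts/data_audit_dms.py | count_repeated_v_pattern
-- ===== SOURCE A (Python) =====
-- def count_repeated_v_pattern(labels: list[str], n_normals_between: int) -> int:
--     """Count V-N*-V episodes, matching DMS bigeminy/trigeminy in the sample."""
--     episodes = 0
--     i = 0
--     step = n_normals_between + 1
--     while i < len(labels):
--         if labels[i] == "V":
--             j = i
--             v_count = 1
--             while (
--                 j + step < len(labels)
--                 and labels[j + step] == "V"
--                 and all(labels[j + d] == "N" for d in range(1, step))
--             ):
--                 j += step
--                 v_count += 1
--             if v_count >= 2: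
--                 episodes += 1
--                 i = j + 1
--                 continue
--         i += 1
--     return episodes
-- ===== SOURCE B (Python) =====
-- def count_repeated_v_pattern(labels: list[str], n_normals_between: int) -> int:
--     """Count V-N*-V episodes using a prefix sum of non-"N" labels for O(1) gap checks."""
--     step = n_normals_between + 1
--     n = len(labels)
--     pref = [0] * (n + 1)
--     for k, lab in enumerate(labels):
--         pref[k + 1] = pref[k] + (0 if lab == "N" else 1)
--
--     def link(j: int) -> bool:
--         return (
--             j + step < n
--             and labels[j] == "V"
--             and labels[j + step] == "V"
--             and pref[j + step] - pref[j + 1] == 0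
--         )
--
--     episodes = 0
--     i = 0
--     while i < n:
--         if link(i):
--             j = i
--             while link(j):
--                 j += step
--             episodes += 1
--             i = j + 1
--         else:
--             i += 1
--     return episodes
-- ===== Notes on version B (the rewrite author's own statement) =====
-- stated objective: alternative
-- what changed: B precomputes a prefix sum of non-'N' labels once and decides each all-N gap check by a single subtraction, instead of A's rescan of the gap at every chain-extension test.
-- outside the precondition, e.g. on count_repeated_v_pattern(['V', 'N'], -2): A returns 0, B returns 0
import Mathlib
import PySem

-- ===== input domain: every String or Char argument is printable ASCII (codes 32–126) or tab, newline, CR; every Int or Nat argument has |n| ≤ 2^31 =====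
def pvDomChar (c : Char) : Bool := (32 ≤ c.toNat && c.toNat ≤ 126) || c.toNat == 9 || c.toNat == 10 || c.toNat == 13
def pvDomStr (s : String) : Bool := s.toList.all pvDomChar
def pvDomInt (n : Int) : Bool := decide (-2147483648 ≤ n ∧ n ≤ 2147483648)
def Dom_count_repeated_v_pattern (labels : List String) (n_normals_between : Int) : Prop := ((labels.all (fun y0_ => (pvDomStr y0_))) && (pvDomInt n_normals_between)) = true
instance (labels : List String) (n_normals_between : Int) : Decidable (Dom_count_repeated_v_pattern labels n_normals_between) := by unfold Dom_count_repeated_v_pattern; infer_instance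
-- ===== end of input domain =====

-- B replaces A's per-step rescan of the gap (all(labels[j+d]=="N")) by a prefix sum of
-- non-"N" labels queried with one subtraction (alternative algorithm, same return value).


-- ===== PORT A =====
-- labels[k], total form: all accesses are guarded in range by the loop conditions
def pvGetS (labels : List String) (i : Int) : String := PySem.List.pyGetD labels i ""

-- the inner while-condition of A: j+step < len and labels[j+step]=="V" and all gap labels are "N"
def pvCondA (labels : List String) (step j : Int) : Bool :=
  decide (j + step < (labels.length : Int)) &&
  (pvGetS labels (j + step) == "V") &&
  (PySem.List.pyRange 1 step 1).all (fun d => pvGetS labels (j + d) == "N")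

-- A's inner while loop: state (j, v_count); fuel makes the recursion total
def pvInnerA (labels : List String) (step : Int) : Nat → Int → Int → Int × Int
  | 0, j, v => (j, v)
  | f + 1, j, v =>
    if pvCondA labels step j then pvInnerA labels step f (j + step) (v + 1) else (j, v)

-- A's outer while loop over i with the episodes accumulator
def pvOuterA (labels : List String) (step : Int) : Nat → Int → Int → Int
  | 0, _, ep => ep
  | f + 1, i, ep =>
    if i < (labels.length : Int) then
      if pvGetS labels i == "V" then
        let r := pvInnerA labels step labels.length i 1
        if 2 ≤ r.2 then pvOuterA labels step f (r.1 + 1) (ep + 1)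
        else pvOuterA labels step f (i + 1) ep
      else pvOuterA labels step f (i + 1) ep
    else ep

def count_repeated_v_pattern (labels : List String) (n_normals_between : Int) : Int :=
  pvOuterA labels (n_normals_between + 1) labels.length 0 0

-- ===== PORT B =====
-- pref[k+1] = pref[k] + (0 if lab == "N" else 1), built in one pass with the running sum as state
def pvPrefAux : List String → Int → List Int
  | [], _ => []
  | lab :: rest, acc =>
    let acc' := acc + (if lab == "N" then 0 else 1)
    acc' :: pvPrefAux rest acc'

def pvPref (labels : List String) : List Int := 0 :: pvPrefAux labels 0

-- B's link(j): both endpoints are "V" and the prefix sums show no non-"N" label in the gap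
def pvLink (labels : List String) (pref : List Int) (step j : Int) : Bool :=
  decide (j + step < (labels.length : Int)) &&
  (pvGetS labels j == "V") &&
  (pvGetS labels (j + step) == "V") &&
  (PySem.List.pyGetD pref (j + step) 0 - PySem.List.pyGetD pref (j + 1) 0 == 0)

-- B's inner walk: follow links, return the last V of the chain
def pvWalkB (labels : List String) (pref : List Int) (step : Int) : Nat → Int → Int
  | 0, j => j
  | f + 1, j => if pvLink labels pref step j then pvWalkB labels pref step f (j + step) else j

-- B's outer while loop
def pvOuterB (labels : List String) (pref : List Int) (step : Int) : Nat → Int → Int → Int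
  | 0, _, ep => ep
  | f + 1, i, ep =>
    if i < (labels.length : Int) then
      if pvLink labels pref step i then
        pvOuterB labels pref step f (pvWalkB labels pref step labels.length i + 1) (ep + 1)
      else pvOuterB labels pref step f (i + 1) ep
    else ep

def count_repeated_v_pattern_alt (labels : List String) (n_normals_between : Int) : Int :=
  pvOuterB labels (pvPref labels) (n_normals_between + 1) labels.length 0 0

-- ===== PRECONDITION & SPEC =====
-- Pre_ excludes negative n_normals_between (step ≤ 0) when a "V" is present: outside the function's
-- natural domain, and there A can loop forever (e.g. ["V","V"] with -1), raise IndexError by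
-- negative-index wraparound, or return a value produced by that wraparound.
def Pre_count_repeated_v_pattern (labels : List String) (n_normals_between : Int) : Prop :=
  0 ≤ n_normals_between ∨ "V" ∉ labels
instance (labels : List String) (n_normals_between : Int) : Decidable (Pre_count_repeated_v_pattern labels n_normals_between) := by unfold Pre_count_repeated_v_pattern; infer_instance

def pvWitness_count_repeated_v_pattern : List String × Int := (["V", "N", "V", "N", "V"], 1)

def Spec_count_repeated_v_pattern (labels : List String) (n_normals_between : Int) (out : Int) : Prop := out = count_repeated_v_pattern_alt labels n_normals_between
instance (labels : List String) (n_normals_between : Int) (out : Int) : Decidable (Spec_count_repeated_v_pattern labels n_normals_between out) := by unfold Spec_count_repeated_v_pattern; infer_instance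

-- ===== CLAIM (what is proved, stated in full; the proofs are below) =====
def Claim_equal_count_repeated_v_pattern : Prop := ∀ (labels : List String) (n_normals_between : Int), Dom_count_repeated_v_pattern labels n_normals_between → Pre_count_repeated_v_pattern labels n_normals_between → Spec_count_repeated_v_pattern labels n_normals_between (count_repeated_v_pattern labels n_normals_between)

-- ===== LEMMAS AND PROOFS =====

-- number of non-"N" labels, as an Int
def pvCnt (l : List String) : Int := (l.countP (fun s => !(s == "N")) : Nat)

theorem pvPrefAux_get (l : List String) : ∀ (k : Nat) (acc : Int), k < l.length →
    (pvPrefAux l acc)[k]? = some (acc + pvCnt (l.take (k + 1))) := by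
  induction l with
  | nil => intro k acc h; simp at h
  | cons lab rest ih =>
    intro k acc h
    cases k with
    | zero =>
      by_cases hN : lab == "N" <;>
        simp [pvPrefAux, pvCnt, hN]
    | succ t =>
      simp only [pvPrefAux, List.getElem?_cons_succ]
      rw [ih t _ (by simpa using h)]
      by_cases hN : lab == "N" <;>
        simp [pvCnt, List.take_succ_cons, hN] <;> omega

theorem pvPref_get (labels : List String) (k : Nat) (hk : k ≤ labels.length) :
    PySem.List.pyGetD (pvPref labels) (k : Int) 0 = pvCnt (labels.take k) := by
  rw [PySem.List.pyGetD_natCast]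
  cases k with
  | zero => simp [pvPref, pvCnt]
  | succ t =>
    simp only [pvPref, List.getD, List.getElem?_cons_succ]
    rw [pvPrefAux_get labels t 0 (by omega)]
    simp


theorem pvGap_iff (labels : List String) (jn sn : Nat) (hs : 1 ≤ sn)
    (h : jn + sn < labels.length) :
    ((PySem.List.pyRange 1 (sn : Int) 1).all
        (fun d => pvGetS labels ((jn : Int) + d) == "N")) = true ↔
      (pvCnt (labels.take (jn + sn)) = pvCnt (labels.take (jn + 1))) := by
  have hsplit : labels.take (jn + sn) = labels.take (jn + 1) ++ (labels.drop (jn + 1)).take (sn - 1) := by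
    rw [← List.take_add]; congr 1; omega
  have hlen : ((labels.drop (jn + 1)).take (sn - 1)).length = sn - 1 := by simp; omega
  have hcnt : pvCnt (labels.take (jn + sn)) = pvCnt (labels.take (jn + 1)) + (((labels.drop (jn + 1)).take (sn - 1)).countP (fun s => !(s == "N")) : Nat) := by
    rw [hsplit]; unfold pvCnt; rw [List.countP_append]; push_cast; ring
  have hiff2 : (pvCnt (labels.take (jn + sn)) = pvCnt (labels.take (jn + 1))) ↔ ((labels.drop (jn + 1)).take (sn - 1)).countP (fun s => !(s == "N")) = 0 := by
    rw [hcnt]; omega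
  rw [hiff2, List.countP_eq_zero]
  constructor
  · intro hall x hx
    obtain ⟨t, ht, hxt⟩ := List.mem_iff_getElem.mp hx
    have ht' : t < sn - 1 := by rw [hlen] at ht; exact ht
    have hx2 : x = labels[jn + 1 + t]'(by omega) := by
      subst hxt; simp [List.getElem_take, List.getElem_drop]
    have hmem : ((1 + t : Nat) : Int) ∈ PySem.List.pyRange 1 (sn : Int) 1 := by
      rw [PySem.List.mem_pyRange_one]; push_cast; omega
    have hN := List.all_eq_true.mp hall _ hmem
    simp only [pvGetS] at hN
    have hidx : (jn : Int) + ((1 + t : Nat) : Int) = ((jn + 1 + t : Nat) : Int) := by push_cast; ring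
    rw [hidx, PySem.List.pyGetD_natCast] at hN
    rw [List.getD_eq_getElem?_getD, List.getElem?_eq_getElem (show jn + 1 + t < labels.length by omega)] at hN
    simp at hN
    simp [hx2, hN]
  · intro hseg
    rw [List.all_eq_true]
    intro d hd
    rw [PySem.List.mem_pyRange_one] at hd
    obtain ⟨hd1, hd2⟩ := hd
    have hdt : d = ((1 + (d - 1).toNat : Nat) : Int) := by push_cast; omega
    set t := (d - 1).toNat with htdef
    have ht' : t < sn - 1 := by omega
    have hxmem : labels[jn + 1 + t]'(by omega) ∈ (labels.drop (jn + 1)).take (sn - 1) := by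
      rw [List.mem_iff_getElem]
      refine ⟨t, by omega, ?_⟩
      simp [List.getElem_take, List.getElem_drop]
    have hN := hseg _ hxmem
    simp at hN
    simp only [pvGetS]
    have hidx : (jn : Int) + d = ((jn + 1 + t : Nat) : Int) := by push_cast; omega
    rw [hidx, PySem.List.pyGetD_natCast]
    rw [List.getD_eq_getElem?_getD, List.getElem?_eq_getElem (show jn + 1 + t < labels.length by omega)]
    simp [hN]

theorem pvCond_eq_link (labels : List String) (step j : Int) (hs : 1 ≤ step) (h0 : 0 ≤ j)
    (hV : pvGetS labels j == "V") :
    pvLink labels (pvPref labels) step j = pvCondA labels step j := by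
  unfold pvLink pvCondA
  by_cases hin : j + step < (labels.length : Int)
  · simp only [hin, decide_true, Bool.true_and, hV]
    by_cases hV2 : pvGetS labels (j + step) == "V"
    · simp only [hV2, Bool.true_and]
      -- translate indices to Nat
      obtain ⟨jn, rfl⟩ : ∃ jn : Nat, j = (jn : Int) := ⟨j.toNat, by omega⟩
      obtain ⟨sn, rfl⟩ : ∃ sn : Nat, step = (sn : Int) := ⟨step.toNat, by omega⟩
      have hs' : 1 ≤ sn := by omega
      have h' : jn + sn < labels.length := by
        have := hin; push_cast at this; omega
      have e1 : (jn : Int) + (sn : Int) = ((jn + sn : Nat) : Int) := by push_cast; ring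
      have e2 : (jn : Int) + 1 = ((jn + 1 : Nat) : Int) := by push_cast; ring
      rw [e1, e2, pvPref_get labels (jn + sn) (by omega), pvPref_get labels (jn + 1) (by omega)]
      rw [Bool.eq_iff_iff]
      simp only [beq_iff_eq, sub_eq_zero]
      exact (pvGap_iff labels jn sn hs' h').symm
    · simp [hV2]
  · simp [hin]

theorem pvInnerA_fst_ge (labels : List String) (step : Int) (hs : 1 ≤ step) :
    ∀ (f : Nat) (j v : Int), j ≤ (pvInnerA labels step f j v).1 := by
  intro f
  induction f with
  | zero => intro j v; simp [pvInnerA]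
  | succ f ih =>
    intro j v
    unfold pvInnerA
    by_cases hc : pvCondA labels step j
    · simp only [hc, if_true]
      have := ih (j + step) (v + 1)
      omega
    · simp [hc]

theorem pvInnerA_snd_ge (labels : List String) (step : Int) :
    ∀ (f : Nat) (j v : Int), v ≤ (pvInnerA labels step f j v).2 := by
  intro f
  induction f with
  | zero => intro j v; simp [pvInnerA]
  | succ f ih =>
    intro j v
    unfold pvInnerA
    by_cases hc : pvCondA labels step j
    · simp only [hc, if_true]
      have := ih (j + step) (v + 1)
      omega
    · simp [hc]

theorem pvWalk_eq (labels : List String) (step : Int) (hs : 1 ≤ step) :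
    ∀ (f : Nat) (j v : Int), 0 ≤ j → pvGetS labels j == "V" →
      (pvInnerA labels step f j v).1 = pvWalkB labels (pvPref labels) step f j := by
  intro f
  induction f with
  | zero => intro j v _ _; simp [pvInnerA, pvWalkB]
  | succ f ih =>
    intro j v h0 hV
    unfold pvInnerA pvWalkB
    rw [pvCond_eq_link labels step j hs h0 hV]
    by_cases hc : pvCondA labels step j
    · simp only [hc, if_true]
      have hV2 : pvGetS labels (j + step) == "V" := by
        unfold pvCondA at hc
        simp only [Bool.and_eq_true] at hc
        exact hc.1.2
      exact ih (j + step) (v + 1) (by omega) hV2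
    · simp [hc]

theorem pvInnerA_stop (labels : List String) (step j : Int)
    (hc : pvCondA labels step j = false) :
    ∀ (f : Nat) (v : Int), pvInnerA labels step f j v = (j, v) := by
  intro f v; cases f <;> simp [pvInnerA, hc]

theorem pvOuter_eq (labels : List String) (step : Int) (hs : 1 ≤ step) :
    ∀ (f : Nat) (i ep : Int), 0 ≤ i →
      pvOuterA labels step f i ep = pvOuterB labels (pvPref labels) step f i ep := by
  intro f
  induction f with
  | zero => intro i ep _; rfl
  | succ f ih =>
    intro i ep h0
    unfold pvOuterA pvOuterB
    by_cases hi : i < (labels.length : Int)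
    · simp only [hi, if_true]
      by_cases hV : pvGetS labels i == "V"
      · by_cases hc : pvCondA labels step i = true
        · have hlink : pvLink labels (pvPref labels) step i = true := by
            rw [pvCond_eq_link labels step i hs h0 hV, hc]
          have hlen1 : 1 ≤ labels.length := by
            have : (0 : Int) < (labels.length : Int) := lt_of_le_of_lt h0 hi
            exact_mod_cast this
          obtain ⟨m, hm⟩ : ∃ m, labels.length = m + 1 := ⟨labels.length - 1, by omega⟩
          have hr2 : 2 ≤ (pvInnerA labels step labels.length i 1).2 := by
            rw [hm]
            unfold pvInnerA
            simp only [hc, if_true]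
            have := pvInnerA_snd_ge labels step m (i + step) (1 + 1)
            omega
          have e := pvWalk_eq labels step hs labels.length i 1 h0 hV
          simp only [hV, if_true, hlink, hr2, ← e]
          exact ih _ _ (by have := pvInnerA_fst_ge labels step hs labels.length i 1; omega)
        · have hc' : pvCondA labels step i = false := by
            revert hc; cases pvCondA labels step i <;> simp
          have hlink : pvLink labels (pvPref labels) step i = false := by
            rw [pvCond_eq_link labels step i hs h0 hV, hc']
          have hstop := pvInnerA_stop labels step i hc' labels.length 1
          simp only [hV, if_true, hlink, Bool.false_eq_true, if_false, hstop]
          norm_num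
          exact ih _ _ (by omega)
      · have hlink : pvLink labels (pvPref labels) step i = false := by
          unfold pvLink
          simp [hV]
        simp only [hV, hlink, Bool.false_eq_true, if_false]
        exact ih _ _ (by omega)
    · simp [hi]

theorem pvOuter_eq_noV (labels : List String) (step : Int) (hnoV : "V" ∉ labels) :
    ∀ (f : Nat) (i ep : Int),
      pvOuterA labels step f i ep = pvOuterB labels (pvPref labels) step f i ep := by
  have hg : ∀ i : Int, (pvGetS labels i == "V") = false := by
    intro i
    rw [beq_eq_false_iff_ne]
    intro contra
    by_cases hr : PySem.Raise.InRange labels.length i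
    · have := PySem.List.pyGetD_mem labels "" hr
      rw [← pvGetS, contra] at this
      exact hnoV this
    · have h : PySem.List.pyGet? labels i = none := by
        rw [PySem.List.pyGet?_eq_none_iff]; exact hr
      rw [pvGetS, PySem.List.pyGetD, h] at contra
      simp at contra
  intro f
  induction f with
  | zero => intro i ep; rfl
  | succ f ih =>
    intro i ep
    unfold pvOuterA pvOuterB
    by_cases hi : i < (labels.length : Int)
    · have hlink : pvLink labels (pvPref labels) step i = false := by
        unfold pvLink; simp [hg i]
      simp only [hi, if_true, hg i, hlink, Bool.false_eq_true, if_false]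
      exact ih _ _
    · simp [hi]

-- ===== VERDICT (by name: the statement is the Claim_ definition above) =====
theorem count_repeated_v_pattern_spec : Claim_equal_count_repeated_v_pattern := by
  intro labels n _hd hpre
  unfold Spec_count_repeated_v_pattern count_repeated_v_pattern count_repeated_v_pattern_alt
  rcases hpre with hn | hnoV
  · exact pvOuter_eq labels (n + 1) (by omega) labels.length 0 0 le_rfl
  · exact pvOuter_eq_noV labels (n + 1) hnoV labels.length 0 0
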